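-- pv_equiv track=rewrite | github.com/Jo-hye-won/TIL_HW | ETC/IM/16811/sol.py | check
-- ===== SOURCE A (Python) =====
-- def check(N, ls): # 당근의 크기를 입력하면 모든 조건을 확인하는 프로그램
--     '''
--     당근 3개 => 소,중,대 상자에 든 당근의 개수 차이 = 0 소 1 중 1 대 1 씩 들어갔으니까
--     당근 5개  > 소 3 중 1 대 1 = 당근의 개수 차이 2
--         그런데 2개 초과하는 상자 잇으니까 조건 만족 x
--     당근 8개
--     '''
--     L = int(N/2) # L초과하는 당근이 있으면 안됨
--     ls.sort()
--     min_chai = 987654321  # 포장개수차이 최소값 초기값 설정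
--     for i in range(N-2):
--         for j in range(i+1, N-1):
--             if ls[i] != ls[i+1] and ls[j] != ls[j+1]:
--                 small = i+1
--                 middle = j-i
--                 large = N-1-j
--                 if small <= L and middle <= L and large <= L:
--                     if min_chai >= (max(small, middle, large) - min(small, middle, large)):
--                         min_chai = max(small, middle, large) - min(small, middle, large)
--     return min_chai
-- ===== SOURCE B (Python) =====
-- def check(N, ls):
--     ls.sort()
--     L = N // 2
--     best = 987654321
--     # cut positions: k in [1, N-1] with ls[k] != ls[k-1]; the second cut q splits
--     # the tail into middle = q - p and large = N - q, so for a fixed first cut p the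
--     # spread max-min of (p, q-p, N-q) is non-increasing in q up to t = (N+p)//2 and
--     # non-decreasing after it: only the nearest valid cuts around t can be optimal.
--     # pred[x] = nearest cut <= x (0 if none), for x = 0..N-1
--     pred = [0]
--     for x in range(1, N):
--         pred.append(x if ls[x] != ls[x - 1] else pred[-1])
--     # nearest cut >= x (N+1 if none), stored from x = N downward: value at index N - x
--     succ = [N + 1]
--     for x in range(N - 1, 0, -1):
--         succ.append(x if ls[x] != ls[x - 1] else succ[-1])
--     for p in range(1, N):
--         if ls[p] != ls[p - 1] and p <= L:
--             lo = max(p + 1, N - L)   # q > p and large box <= L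
--             hi = p + L               # middle box <= L
--             t = (N + p) // 2
--             c = pred[min(hi, t)]
--             if c >= lo:
--                 best = min(best, max(p, c - p, N - c) - min(p, c - p, N - c))
--             c = succ[N - max(lo, t + 1)]
--             if c <= hi:
--                 best = min(best, max(p, c - p, N - c) - min(p, c - p, N - c))
--     return best
-- ===== Notes on version B (the rewrite author's own statement) =====
-- stated objective: faster
-- what changed: B replaces A's double loop over all second-cut positions by a convexity argument: for a fixed first cut p the spread of (p, q-p, N-q) is non-increasing in q up to (N+p)//2 and non-decreasing after, so B precomputes nearest-cut-before and nearest-cut-after arrays in one pass each and evaluates only the two candidate second cuts around the turning point per p.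
-- outside the precondition, e.g. on check(3, [1, 1]): A returns 987654321, B raises IndexError
import Mathlib
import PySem

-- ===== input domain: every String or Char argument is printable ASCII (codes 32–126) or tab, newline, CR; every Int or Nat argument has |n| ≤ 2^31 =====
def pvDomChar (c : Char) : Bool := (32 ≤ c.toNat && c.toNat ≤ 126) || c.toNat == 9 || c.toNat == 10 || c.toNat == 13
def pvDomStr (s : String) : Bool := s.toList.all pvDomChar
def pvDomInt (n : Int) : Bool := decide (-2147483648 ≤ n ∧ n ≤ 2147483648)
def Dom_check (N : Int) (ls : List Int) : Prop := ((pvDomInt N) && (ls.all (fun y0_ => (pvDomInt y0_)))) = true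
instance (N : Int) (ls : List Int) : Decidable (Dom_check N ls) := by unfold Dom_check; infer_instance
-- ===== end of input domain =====

-- B replaces A's scan over all second-cut positions by a convexity argument: per first cut p the
-- spread is non-increasing in q up to (N+p)//2 and non-decreasing after, so B checks only the two
-- nearest valid cuts around that point, found in O(1) via nearest-cut arrays built in one pass each.
-- Equivalence is about the RETURN value (both A and B sort ls in place, the same observable mutation).

-- ===== PORT A =====
def check (N : Int) (ls : List Int) : Int :=
  let L : Int := Int.tdiv N 2  -- int(N/2): truncation toward zero, exact for |N| ≤ 2^31
  let s := PySem.List.sorted ls (fun x => x) false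
  (PySem.List.pyRange 0 (N - 2) 1).foldl (fun mc i =>
    (PySem.List.pyRange (i + 1) (N - 1) 1).foldl (fun mc j =>
      if PySem.List.pyGetD s i 0 ≠ PySem.List.pyGetD s (i + 1) 0 ∧
         PySem.List.pyGetD s j 0 ≠ PySem.List.pyGetD s (j + 1) 0 then
        let small := i + 1
        let middle := j - i
        let large := N - 1 - j
        if small ≤ L ∧ middle ≤ L ∧ large ≤ L then
          if mc ≥ max (max small middle) large - min (min small middle) large then
            max (max small middle) large - min (min small middle) large
          else mc
        else mc
      else mc) mc) 987654321

-- ===== PORT B =====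
def check_alt (N : Int) (ls : List Int) : Int :=
  let s := PySem.List.sorted ls (fun x => x) false
  let L : Int := PySem.Int.floordiv N 2
  let pred := (PySem.List.pyRange 1 N 1).foldl
    (fun acc x => acc ++ [if PySem.List.pyGetD s x 0 ≠ PySem.List.pyGetD s (x - 1) 0 then x
                          else PySem.List.pyGetD acc (-1) 0]) [(0 : Int)]
  let succ := (PySem.List.pyRange (N - 1) 0 (-1)).foldl
    (fun acc x => acc ++ [if PySem.List.pyGetD s x 0 ≠ PySem.List.pyGetD s (x - 1) 0 then x
                          else PySem.List.pyGetD acc (-1) 0]) [N + 1]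
  (PySem.List.pyRange 1 N 1).foldl (fun best p =>
    if PySem.List.pyGetD s p 0 ≠ PySem.List.pyGetD s (p - 1) 0 ∧ p ≤ L then
      let lo := max (p + 1) (N - L)
      let hi := p + L
      let t := PySem.Int.floordiv (N + p) 2
      let c := PySem.List.pyGetD pred (min hi t) 0
      let best := if c ≥ lo then
          min best (max (max p (c - p)) (N - c) - min (min p (c - p)) (N - c)) else best
      let c := PySem.List.pyGetD succ (N - max lo (t + 1)) 0
      if c ≤ hi then
          min best (max (max p (c - p)) (N - c) - min (min p (c - p)) (N - c)) else best
    else best) 987654321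

-- ===== PRECONDITION & SPEC =====
-- Pre_ excludes N > len(ls), where A's index accesses can raise IndexError (for a few such
-- inputs A's guards short-circuit before the bad access and it still returns; B raises there).
def Pre_check (N : Int) (ls : List Int) : Prop := N ≤ (ls.length : Int)
instance (N : Int) (ls : List Int) : Decidable (Pre_check N ls) := by unfold Pre_check; infer_instance
def pvWitness_check : Int × List Int := (4, [1, 2, 2, 3])
def Spec_check (N : Int) (ls : List Int) (out : Int) : Prop := out = check_alt N ls
instance (N : Int) (ls : List Int) (out : Int) : Decidable (Spec_check N ls out) := by unfold Spec_check; infer_instance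

-- ===== CLAIM (what is proved, stated in full; the proofs are below) =====
def Claim_equal_check : Prop := ∀ (N : Int) (ls : List Int), Dom_check N ls → Pre_check N ls → Spec_check N ls (check N ls)

-- ===== LEMMAS AND PROOFS =====

-- the boundary test, the size condition and the objective, shared by both normal forms
def pvBnd (s : List Int) (k : Int) : Bool :=
  decide (PySem.List.pyGetD s (k - 1) 0 ≠ PySem.List.pyGetD s k 0)
def pvOk (L N p q : Int) : Bool := decide (p ≤ L ∧ q - p ≤ L ∧ N - q ≤ L)
def pvV (N p q : Int) : Int :=
  max (max p (q - p)) (N - q) - min (min p (q - p)) (N - q)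

-- nearest cut at or before x (0 if none): the value B's pred array holds at index x
def pvPredF (s : List Int) : Nat → Int
  | 0 => 0
  | x + 1 => if pvBnd s ((x : Int) + 1) then (x : Int) + 1 else pvPredF s x

-- nearest cut at or after N - k (N + 1 if none): the value B's succ array holds at index k
def pvSuccF (s : List Int) (N : Int) : Nat → Int
  | 0 => N + 1
  | k + 1 => if pvBnd s (N - 1 - (k : Int)) then N - 1 - (k : Int) else pvSuccF s N k

-- A's `if mc >= v then v else mc` update is `min mc v`
theorem pv_ite_min (mc v : Int) : (if mc ≥ v then v else mc) = min mc v := by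
  split_ifs <;> omega

-- reindexing a fold over range(a, b) by x ↦ x + 1
theorem pv_foldl_shift (f : Int → Int → Int) (a b a' b' : Int) (init : Int)
    (ha : a' = a + 1) (hb : b' = b + 1) :
    (PySem.List.pyRange a b 1).foldl (fun acc x => f acc (x + 1)) init
      = (PySem.List.pyRange a' b' 1).foldl f init := by
  subst ha hb
  rw [PySem.List.pyRange_one, PySem.List.pyRange_one, List.foldl_map, List.foldl_map]
  rw [show (b + 1 - (a + 1)).toNat = (b - a).toNat by omega]
  apply List.foldl_ext
  intro acc k _
  rw [show a + (k:Int) + 1 = a + 1 + k by ring]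

theorem pv_foldl_fixed_of (l : List Int) (f : Int → Int → Int) (init : Int)
    (h : ∀ a x, x ∈ l → f a x = a) : l.foldl f init = init := by
  rw [List.foldl_ext f (fun a _ => a) init h]
  exact List.foldl_fixed l

-- the core of A's normal form: a guarded triangular double loop over [p0, N) equals the loop that
-- filters the boundary condition out front and replaces the triangular inner range by a `p < q` test
theorem pv_main (bnd : Int → Bool) (ok : Int → Int → Bool) (v : Int → Int → Int) (N : Int) :
    ∀ (n : Nat) (p0 acc : Int), 1 ≤ p0 → p0 + (n : Int) = N →
    (PySem.List.pyRange p0 N 1).foldl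
      (fun a p => (PySem.List.pyRange (p + 1) N 1).foldl
        (fun a q => if bnd p && bnd q && ok p q then min a (v p q) else a) a) acc
    =
    (PySem.List.pyRange p0 N 1).foldl
      (fun a p => if bnd p then
        (PySem.List.pyRange 1 N 1).foldl
          (fun a q => if bnd q then (if p < q then (if ok p q then min a (v p q) else a) else a) else a) a
        else a) acc := by
  intro n
  induction n with
  | zero =>
    intro p0 acc h1 hN
    rw [PySem.List.pyRange_one_eq_nil (by omega)]
    simp
  | succ n ih =>
    intro p0 acc h1 hN
    rw [PySem.List.pyRange_one_cons (by omega : p0 < N)]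
    simp only [List.foldl_cons]
    have hhead :
        (PySem.List.pyRange (p0 + 1) N 1).foldl
          (fun a q => if bnd p0 && bnd q && ok p0 q then min a (v p0 q) else a) acc
        = (if bnd p0 then
            (PySem.List.pyRange 1 N 1).foldl
              (fun a q => if bnd q then (if p0 < q then (if ok p0 q then min a (v p0 q) else a) else a) else a) acc
           else acc) := by
      by_cases hb : bnd p0
      · rw [if_pos hb]
        rw [PySem.List.pyRange_one_append 1 (p0 + 1) N (by omega) (by omega), List.foldl_append]
        rw [pv_foldl_fixed_of (PySem.List.pyRange 1 (p0 + 1) 1) _ acc ?_]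
        · apply List.foldl_ext
          intro a q hq
          have hlt : p0 < q := by
            have := (PySem.List.mem_pyRange_one.mp hq).1; omega
          rw [if_pos hlt, hb]
          by_cases hbq : bnd q <;> by_cases hok : ok p0 q <;> simp [hbq, hok]
        · intro a q hq
          have hle : q ≤ p0 := by
            have := (PySem.List.mem_pyRange_one.mp hq).2; omega
          rw [if_neg (by omega : ¬ p0 < q)]
          simp
      · rw [if_neg hb]
        apply pv_foldl_fixed_of
        intro a q _
        simp [hb]
    rw [hhead]
    exact ih (p0 + 1) _ (by omega) (by omega)

-- A in normal form (for N ≥ 2): the triangular guarded double loop over cut positions 1..N-1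
theorem pv_A_norm (N : Int) (ls : List Int) (hN : 2 ≤ N) :
    check N ls
    = (PySem.List.pyRange 1 N 1).foldl
        (fun a p => (PySem.List.pyRange (p + 1) N 1).foldl
          (fun a q => if pvBnd (PySem.List.sorted ls (fun x => x) false) p &&
                         pvBnd (PySem.List.sorted ls (fun x => x) false) q &&
                         pvOk (Int.tdiv N 2) N p q then min a (pvV N p q) else a) a) 987654321 := by
  unfold check
  simp only
  set s := PySem.List.sorted ls (fun x => x) false with hs
  set L := Int.tdiv N 2 with hL
  set H : Int → Int → Int → Int := fun p a q =>
    if pvBnd s p && pvBnd s q && pvOk L N p q then min a (pvV N p q) else a with hH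
  have h2 : ∀ (mc i : Int),
      (PySem.List.pyRange (i + 1) (N - 1) 1).foldl (fun mc j =>
        if PySem.List.pyGetD s i 0 ≠ PySem.List.pyGetD s (i + 1) 0 ∧
           PySem.List.pyGetD s j 0 ≠ PySem.List.pyGetD s (j + 1) 0 then
          if i + 1 ≤ L ∧ j - i ≤ L ∧ N - 1 - j ≤ L then
            if mc ≥ max (max (i + 1) (j - i)) (N - 1 - j) - min (min (i + 1) (j - i)) (N - 1 - j) then
              max (max (i + 1) (j - i)) (N - 1 - j) - min (min (i + 1) (j - i)) (N - 1 - j)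
            else mc
          else mc
        else mc) mc
      = (PySem.List.pyRange (i + 1 + 1) N 1).foldl (H (i + 1)) mc := by
    intro mc i
    have e1 : (PySem.List.pyRange (i + 1) (N - 1) 1).foldl (fun mc j =>
        if PySem.List.pyGetD s i 0 ≠ PySem.List.pyGetD s (i + 1) 0 ∧
           PySem.List.pyGetD s j 0 ≠ PySem.List.pyGetD s (j + 1) 0 then
          if i + 1 ≤ L ∧ j - i ≤ L ∧ N - 1 - j ≤ L then
            if mc ≥ max (max (i + 1) (j - i)) (N - 1 - j) - min (min (i + 1) (j - i)) (N - 1 - j) then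
              max (max (i + 1) (j - i)) (N - 1 - j) - min (min (i + 1) (j - i)) (N - 1 - j)
            else mc
          else mc
        else mc) mc
        = (PySem.List.pyRange (i + 1) (N - 1) 1).foldl (fun a j => H (i + 1) a (j + 1)) mc := by
      apply List.foldl_ext
      intro a j _
      simp only [hH, pvBnd, pvOk, pvV, add_sub_cancel_right]
      rw [show j + 1 - (i + 1) = j - i by ring, show N - (j + 1) = N - 1 - j by ring]
      rw [pv_ite_min]
      by_cases h1 : PySem.List.pyGetD s i 0 ≠ PySem.List.pyGetD s (i + 1) 0 <;>
        by_cases h2 : PySem.List.pyGetD s j 0 ≠ PySem.List.pyGetD s (j + 1) 0 <;>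
        by_cases h3 : i + 1 ≤ L ∧ j - i ≤ L ∧ N - 1 - j ≤ L <;>
        simp [h1, h2, h3]
    rw [e1, pv_foldl_shift (H (i + 1)) (i + 1) (N - 1) (i + 1 + 1) N mc rfl (by ring)]
  have e2 : (PySem.List.pyRange 0 (N - 2) 1).foldl (fun mc i =>
      (PySem.List.pyRange (i + 1) (N - 1) 1).foldl (fun mc j =>
        if PySem.List.pyGetD s i 0 ≠ PySem.List.pyGetD s (i + 1) 0 ∧
           PySem.List.pyGetD s j 0 ≠ PySem.List.pyGetD s (j + 1) 0 then
          if i + 1 ≤ L ∧ j - i ≤ L ∧ N - 1 - j ≤ L then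
            if mc ≥ max (max (i + 1) (j - i)) (N - 1 - j) - min (min (i + 1) (j - i)) (N - 1 - j) then
              max (max (i + 1) (j - i)) (N - 1 - j) - min (min (i + 1) (j - i)) (N - 1 - j)
            else mc
          else mc
        else mc) mc) 987654321
      = (PySem.List.pyRange 0 (N - 2) 1).foldl
          (fun mc i => (PySem.List.pyRange (i + 1 + 1) N 1).foldl (H (i + 1)) mc) 987654321 := by
    apply List.foldl_ext
    intro a i _
    exact h2 a i
  rw [e2]
  rw [pv_foldl_shift (fun mc p => (PySem.List.pyRange (p + 1) N 1).foldl (H p) mc)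
        0 (N - 2) 1 (N - 1) 987654321 (by ring) (by ring)]
  rw [PySem.List.pyRange_one_append 1 (N - 1) N (by omega) (by omega), List.foldl_append]
  rw [PySem.List.pyRange_one_cons (show N - 1 < N by omega),
      PySem.List.pyRange_one_eq_nil (show N ≤ N - 1 + 1 by omega)]
  simp only [List.foldl_cons, List.foldl_nil]
  rw [PySem.List.pyRange_one_eq_nil (by omega : N ≤ N - 1 + 1)]
  simp only [List.foldl_nil, hH, Bool.and_eq_true]

-- min-fold facts
theorem pv_foldl_min_le (l : List Int) (a : Int) :
    l.foldl min a ≤ a ∧ ∀ x ∈ l, l.foldl min a ≤ x := by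
  induction l generalizing a with
  | nil => simp
  | cons h t ih =>
    simp only [List.foldl_cons, List.mem_cons]
    obtain ⟨ih1, ih2⟩ := ih (min a h)
    refine ⟨le_trans ih1 (by omega), ?_⟩
    rintro x (rfl | hx)
    · exact le_trans ih1 (by omega)
    · exact ih2 x hx

theorem pv_foldl_min_mem (l : List Int) (a : Int) :
    l.foldl min a = a ∨ l.foldl min a ∈ l := by
  induction l generalizing a with
  | nil => simp
  | cons h t ih =>
    simp only [List.foldl_cons, List.mem_cons]
    rcases ih (min a h) with h1 | h1
    · rcases (by omega : a ≤ h ∨ h < a) with hc | hc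
      · left; omega
      · right; left; omega
    · right; right; exact h1

theorem pv_foldl_min_eq (a : Int) (l1 l2 : List Int)
    (h12 : ∀ x ∈ l1, ∃ y ∈ l2, y ≤ x) (h21 : ∀ y ∈ l2, ∃ x ∈ l1, x ≤ y) :
    l1.foldl min a = l2.foldl min a := by
  have le1 := pv_foldl_min_le l1 a
  have le2 := pv_foldl_min_le l2 a
  apply le_antisymm
  · rcases pv_foldl_min_mem l2 a with h | h
    · omega
    · obtain ⟨x, hx, hxle⟩ := h21 _ h
      exact le_trans (le1.2 x hx) hxle
  · rcases pv_foldl_min_mem l1 a with h | h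
    · omega
    · obtain ⟨y, hy, hyle⟩ := h12 _ h
      exact le_trans (le2.2 y hy) hyle

-- a guarded min-accumulation is a min-fold over the filtered mapped list
theorem pv_foldl_ite_min (P : Int → Bool) (f : Int → Int) (l : List Int) (a : Int) :
    l.foldl (fun a q => if P q then min a (f q) else a) a
      = ((l.filter P).map f).foldl min a := by
  induction l generalizing a with
  | nil => simp
  | cons h t ih =>
    by_cases hp : P h
    · simp [hp, ih]
    · simp [hp, ih]

theorem pv_getLast_map_range (F : Nat → Int) (j : Nat) (h : (List.range (j+1)).map F ≠ []) :
    ((List.range (j+1)).map F).getLast h = F j := by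
  simp [List.range_succ]

theorem pv_get_map_range (F : Nat → Int) (n : Nat) (i : Int) (h0 : 0 ≤ i) (h1 : i < (n : Int)) :
    PySem.List.pyGetD ((List.range n).map F) i 0 = F i.toNat := by
  have hlt : i.toNat < n := by omega
  rw [PySem.List.pyGetD_of_nonneg _ _ h0]
  simp [List.getD_eq_getElem?_getD, List.getElem?_range hlt]

theorem pv_ite_swap (a b : Int) (x y : Int) :
    (if a ≠ b then x else y) = (if decide (b ≠ a) = true then x else y) := by
  by_cases h : a = b
  · simp [h]
  · simp [h, Ne.symm h]

theorem pv_pred_gen (s : List Int) (m : Nat) : ∀ (r j : Nat), 1 ≤ j → j + r = m + 1 →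
    (PySem.List.pyRange (j : Int) ((m : Int) + 1) 1).foldl
      (fun acc x => acc ++ [if PySem.List.pyGetD s x 0 ≠ PySem.List.pyGetD s (x - 1) 0 then x
                            else PySem.List.pyGetD acc (-1) 0]) ((List.range j).map (pvPredF s))
    = (List.range (m + 1)).map (pvPredF s) := by
  intro r
  induction r with
  | zero =>
    intro j h1 hj
    have : j = m + 1 := by omega
    subst this
    rw [PySem.List.pyRange_one_eq_nil (by push_cast; omega)]
    rfl
  | succ r ih =>
    intro j h1 hj
    obtain ⟨i, rfl⟩ : ∃ i, j = i + 1 := ⟨j - 1, by omega⟩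
    rw [PySem.List.pyRange_one_cons (by push_cast; omega)]
    simp only [List.foldl_cons, Nat.cast_add, Nat.cast_one]
    have hne : (List.range (i + 1)).map (pvPredF s) ≠ [] := by simp
    have hv : (if PySem.List.pyGetD s ((i : Int) + 1) 0 ≠ PySem.List.pyGetD s (((i : Int) + 1) - 1) 0
          then ((i : Int) + 1)
          else PySem.List.pyGetD ((List.range (i + 1)).map (pvPredF s)) (-1) 0)
        = pvPredF s (i + 1) := by
      rw [PySem.List.pyGetD_neg_one _ _ hne, pv_getLast_map_range]
      show _ = (if pvBnd s ((i : Int) + 1) then (i : Int) + 1 else pvPredF s i)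
      simp only [pvBnd, add_sub_cancel_right]
      exact pv_ite_swap _ _ _ _
    rw [hv]
    have hacc : (List.range (i + 1)).map (pvPredF s) ++ [pvPredF s (i + 1)]
        = (List.range (i + 1 + 1)).map (pvPredF s) := by
      simp [List.range_succ]
    rw [hacc]
    have := ih (i + 1 + 1) (by omega) (by omega)
    simp only [Nat.cast_add, Nat.cast_one] at this
    exact this


-- characterization of B's pred array
theorem pv_pred_build (s : List Int) (m : Nat) :
    (PySem.List.pyRange 1 ((m : Int) + 1) 1).foldl
      (fun acc x => acc ++ [if PySem.List.pyGetD s x 0 ≠ PySem.List.pyGetD s (x - 1) 0 then x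
                            else PySem.List.pyGetD acc (-1) 0]) [(0 : Int)]
    = (List.range (m + 1)).map (pvPredF s) := by
  have := pv_pred_gen s m m 1 (by omega) (by omega)
  simpa [pvPredF] using this

theorem pv_succ_gen (s : List Int) (N : Int) (m : Nat) (hN : N = (m : Int) + 1) :
    ∀ (r j : Nat), j + r = m →
    (PySem.List.pyRange ((m : Int) - (j : Int)) 0 (-1)).foldl
      (fun acc x => acc ++ [if PySem.List.pyGetD s x 0 ≠ PySem.List.pyGetD s (x - 1) 0 then x
                            else PySem.List.pyGetD acc (-1) 0]) ((List.range (j + 1)).map (pvSuccF s N))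
    = (List.range (m + 1)).map (pvSuccF s N) := by
  intro r
  induction r with
  | zero =>
    intro j hj
    have : j = m := by omega
    subst this
    rw [PySem.List.pyRange_neg_one_eq_nil (by omega)]
    rfl
  | succ r ih =>
    intro j hj
    rw [PySem.List.pyRange_neg_one_cons (by omega : (0:Int) < (m : Int) - (j : Int))]
    simp only [List.foldl_cons]
    have hne : (List.range (j + 1)).map (pvSuccF s N) ≠ [] := by simp
    have hv : (if PySem.List.pyGetD s ((m : Int) - (j : Int)) 0 ≠ PySem.List.pyGetD s ((m : Int) - (j : Int) - 1) 0
          then ((m : Int) - (j : Int))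
          else PySem.List.pyGetD ((List.range (j + 1)).map (pvSuccF s N)) (-1) 0)
        = pvSuccF s N (j + 1) := by
      rw [PySem.List.pyGetD_neg_one _ _ hne, pv_getLast_map_range]
      show _ = (if pvBnd s (N - 1 - (j : Int)) then N - 1 - (j : Int) else pvSuccF s N j)
      simp only [pvBnd]
      rw [show N - 1 - (j : Int) = (m : Int) - (j : Int) by omega]
      exact pv_ite_swap _ _ _ _
    rw [hv]
    have hacc : (List.range (j + 1)).map (pvSuccF s N) ++ [pvSuccF s N (j + 1)]
        = (List.range (j + 1 + 1)).map (pvSuccF s N) := by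
      simp [List.range_succ]
    rw [hacc]
    have := ih (j + 1) (by omega)
    rw [show (m : Int) - (j : Int) - 1 = (m : Int) - ((j + 1 : Nat) : Int) by push_cast; ring]
    exact this


-- characterization of B's succ array
theorem pv_succ_build (s : List Int) (N : Int) (m : Nat) (hN : N = (m : Int) + 1) :
    (PySem.List.pyRange (N - 1) 0 (-1)).foldl
      (fun acc x => acc ++ [if PySem.List.pyGetD s x 0 ≠ PySem.List.pyGetD s (x - 1) 0 then x
                            else PySem.List.pyGetD acc (-1) 0]) [N + 1]
    = (List.range (m + 1)).map (pvSuccF s N) := by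
  have := pv_succ_gen s N m hN m 0 (by omega)
  rw [show (m : Int) - ((0 : Nat) : Int) = N - 1 by omega] at this
  simpa [pvSuccF] using this

theorem pvPredF_le (s : List Int) (x : Nat) : pvPredF s x ≤ (x : Int) := by
  induction x with
  | zero => simp [pvPredF]
  | succ n ih =>
    simp only [pvPredF]
    split
    · push_cast; omega
    · push_cast; omega

theorem pvPredF_or (s : List Int) (x : Nat) :
    pvPredF s x = 0 ∨ (1 ≤ pvPredF s x ∧ pvBnd s (pvPredF s x) = true) := by
  induction x with
  | zero => left; rfl
  | succ n ih =>
    simp only [pvPredF]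
    split
    · rename_i h
      right; exact ⟨by omega, by exact_mod_cast h⟩
    · exact ih

theorem pvPredF_max (s : List Int) (x : Nat) (q : Int)
    (h1 : 1 ≤ q) (h2 : q ≤ (x : Int)) (hb : pvBnd s q = true) : q ≤ pvPredF s x := by
  induction x with
  | zero => omega
  | succ n ih =>
    simp only [pvPredF]
    split
    · push_cast at h2 ⊢; omega
    · rename_i h
      rcases (by push_cast at h2; omega : q ≤ (n : Int) ∨ q = (n : Int) + 1) with hc | hc
      · exact ih hc
      · rw [hc] at hb; exact absurd hb (by simp [h])

theorem pvSuccF_ge (s : List Int) (N : Int) (k : Nat) : N - (k : Int) ≤ pvSuccF s N k := by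
  induction k with
  | zero => simp [pvSuccF]
  | succ n ih =>
    simp only [pvSuccF]
    split
    · push_cast; omega
    · push_cast; omega

theorem pvSuccF_or (s : List Int) (N : Int) (k : Nat) :
    pvSuccF s N k = N + 1 ∨ (pvBnd s (pvSuccF s N k) = true ∧ pvSuccF s N k ≤ N - 1) := by
  induction k with
  | zero => left; rfl
  | succ n ih =>
    simp only [pvSuccF]
    split
    · rename_i h
      right; exact ⟨by exact_mod_cast h, by omega⟩
    · exact ih

theorem pvSuccF_min (s : List Int) (N : Int) (k : Nat) (q : Int)
    (hb : pvBnd s q = true) (h1 : N - (k : Int) ≤ q) (h2 : q ≤ N - 1) : pvSuccF s N k ≤ q := by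
  induction k with
  | zero => omega
  | succ n ih =>
    simp only [pvSuccF]
    split
    · push_cast at h1; omega
    · rename_i h
      rcases (by push_cast at h1; omega : N - (n : Int) ≤ q ∨ q = N - 1 - (n : Int)) with hc | hc
      · exact ih hc
      · rw [hc] at hb; exact absurd hb (by simp [h])

-- monotonicity of the spread in the second cut (the convexity argument)
theorem pv_mono1 (N p q1 q2 : Int) (_h1 : p < q1) (h2 : q1 ≤ q2) (h3 : 2 * q2 ≤ N + p) :
    pvV N p q2 ≤ pvV N p q1 := by
  unfold pvV; omega

theorem pv_mono2 (N p q1 q2 : Int) (_h1 : p < q1) (h2 : q1 ≤ q2) (h3 : N + p + 1 ≤ 2 * q1) :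
    pvV N p q1 ≤ pvV N p q2 := by
  unfold pvV; omega

-- the two candidate spread values B examines for a first cut p
def pvCand (s : List Int) (N L p : Int) : List Int :=
  (if max (p + 1) (N - L) ≤ pvPredF s (min (p + L) (PySem.Int.floordiv (N + p) 2)).toNat
   then [pvV N p (pvPredF s (min (p + L) (PySem.Int.floordiv (N + p) 2)).toNat)] else []) ++
  (if pvSuccF s N (N - max (max (p + 1) (N - L)) (PySem.Int.floordiv (N + p) 2 + 1)).toNat ≤ p + L
   then [pvV N p (pvSuccF s N (N - max (max (p + 1) (N - L)) (PySem.Int.floordiv (N + p) 2 + 1)).toNat)] else [])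

theorem pv_div2 (x t : Int) (ht : t = PySem.Int.floordiv x 2) : 2 * t ≤ x ∧ x < 2 * t + 2 := by
  have h1 := PySem.Int.floordiv_mul_add_mod x 2
  have h2 := PySem.Int.mod_nonneg x (b := 2) (by omega)
  have h3 := PySem.Int.mod_lt x (b := 2) (by omega)
  omega

-- the convexity core: min over all valid second cuts = min over B's two candidates
theorem pv_key (s : List Int) (N L p : Int) (h2 : 2 ≤ N)
    (hL : L = PySem.Int.floordiv N 2) (hp1 : 1 ≤ p) (hpN : p < N)
    (_hb : pvBnd s p = true) (hpL : p ≤ L) (a : Int) :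
    ((((PySem.List.pyRange 1 N 1).filter (pvBnd s)).filter
        (fun q => decide (max (p + 1) (N - L) ≤ q ∧ q ≤ p + L))).map (pvV N p)).foldl min a
    = (pvCand s N L p).foldl min a := by
  have hLL := pv_div2 N L hL
  have ht := pv_div2 (N + p) (PySem.Int.floordiv (N + p) 2) rfl
  set t := PySem.Int.floordiv (N + p) 2 with hts
  set lo := max (p + 1) (N - L) with hlo
  set hi := p + L with hhi
  have ht1 : 1 ≤ t := by omega
  have htN : t ≤ N - 1 := by omega
  have hL1 : 1 ≤ L := by omega
  have hloN : lo ≤ N := by omega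
  have hlo2 : 2 ≤ lo := by omega
  have hhiN : hi ≤ N := by omega
  -- index 1 and candidate 1
  set i1 := min hi t with hi1
  have hi1b : 1 ≤ i1 ∧ i1 ≤ N - 1 := by omega
  have hi1n : ((i1.toNat : Int)) = i1 := by omega
  set c1 := pvPredF s i1.toNat with hc1
  have hc1le : c1 ≤ i1 := by rw [← hi1n]; exact pvPredF_le s i1.toNat
  -- index 2 and candidate 2
  set j := max lo (t + 1) with hj
  have hjb : 2 ≤ j ∧ j ≤ N := by omega
  have hkn : (((N - j).toNat : Int)) = N - j := by omega
  set c2 := pvSuccF s N (N - j).toNat with hc2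
  have hc2ge : j ≤ c2 := by have := pvSuccF_ge s N (N - j).toNat; omega
  -- membership in the window list
  have hmem : ∀ x, x ∈ (((PySem.List.pyRange 1 N 1).filter (pvBnd s)).filter
        (fun q => decide (lo ≤ q ∧ q ≤ hi))).map (pvV N p) ↔
      ∃ q, (1 ≤ q ∧ q < N) ∧ pvBnd s q = true ∧ (lo ≤ q ∧ q ≤ hi) ∧ x = pvV N p q := by
    intro x
    simp only [List.mem_map, List.mem_filter, PySem.List.mem_pyRange_one, decide_eq_true_eq]
    constructor
    · rintro ⟨q, ⟨⟨⟨hq1, hq2⟩, hq3⟩, hq4⟩, rfl⟩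
      exact ⟨q, ⟨hq1, hq2⟩, hq3, hq4, rfl⟩
    · rintro ⟨q, ⟨hq1, hq2⟩, hq3, hq4, rfl⟩
      exact ⟨q, ⟨⟨⟨hq1, hq2⟩, hq3⟩, hq4⟩, rfl⟩
  have hmemC : ∀ y, y ∈ pvCand s N L p ↔
      (lo ≤ c1 ∧ y = pvV N p c1) ∨ (c2 ≤ hi ∧ y = pvV N p c2) := by
    intro y
    simp only [pvCand, ← hts, ← hlo, ← hhi, ← hi1, ← hj, ← hc1, ← hc2, List.mem_append]
    constructor
    · rintro (hy | hy) <;> [left; right] <;>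
        (split at hy <;> simp_all)
    · rintro (⟨hg, rfl⟩ | ⟨hg, rfl⟩)
      · left; simp [hg]
      · right; simp [hg]
  apply pv_foldl_min_eq
  · -- every window value is dominated by a candidate
    intro x hx
    obtain ⟨q, ⟨hq1, hq2⟩, hqb, ⟨hql, hqh⟩, rfl⟩ := (hmem x).mp hx
    rcases (by omega : 2 * q ≤ N + p ∨ N + p + 1 ≤ 2 * q) with hcase | hcase
    · -- q ≤ t: candidate 1 applies
      have hqt : q ≤ i1 := by omega
      have hqc1 : q ≤ c1 := by
        rw [hc1]; exact pvPredF_max s i1.toNat q (by omega) (by omega) hqb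
      refine ⟨pvV N p c1, (hmemC _).mpr (Or.inl ⟨by omega, rfl⟩), ?_⟩
      exact pv_mono1 N p q c1 (by omega) hqc1 (by omega)
    · -- q ≥ t+1: candidate 2 applies
      have hqj : j ≤ q := by omega
      have hqc2 : c2 ≤ q := by
        rw [hc2]; exact pvSuccF_min s N (N - j).toNat q hqb (by omega) (by omega)
      refine ⟨pvV N p c2, (hmemC _).mpr (Or.inr ⟨by omega, rfl⟩), ?_⟩
      exact pv_mono2 N p c2 q (by omega) hqc2 (by omega)
  · -- every candidate is itself a window value
    intro y hy
    rcases (hmemC y).mp hy with ⟨hg, rfl⟩ | ⟨hg, rfl⟩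
    · have hor := pvPredF_or s i1.toNat
      rw [← hc1] at hor
      rcases hor with h0 | ⟨hge1, hbc⟩
      · omega
      · exact ⟨pvV N p c1, (hmem _).mpr ⟨c1, ⟨by omega, by omega⟩, hbc, ⟨hg, by omega⟩, rfl⟩, le_refl _⟩
    · have hor := pvSuccF_or s N (N - j).toNat
      rw [← hc2] at hor
      rcases hor with h0 | ⟨hbc, hcN⟩
      · omega
      · exact ⟨pvV N p c2, (hmem _).mpr ⟨c2, ⟨by omega, by omega⟩, hbc, ⟨by omega, hg⟩, rfl⟩, le_refl _⟩

theorem pv_A_norm2 (N : Int) (ls : List Int) (hN : 2 ≤ N) (L : Int) (hL : L = Int.tdiv N 2) :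
    check N ls
    = ((PySem.List.pyRange 1 N 1).filter
        (fun p => pvBnd (PySem.List.sorted ls (fun x => x) false) p && decide (p ≤ L))).foldl
        (fun a p => ((((PySem.List.pyRange 1 N 1).filter (pvBnd (PySem.List.sorted ls (fun x => x) false))).filter
            (fun q => decide (max (p + 1) (N - L) ≤ q ∧ q ≤ p + L))).map (pvV N p)).foldl min a)
        987654321 := by
  rw [pv_A_norm N ls hN, ← hL]
  rw [pv_main (pvBnd (PySem.List.sorted ls (fun x => x) false))
      (pvOk L N) (pvV N) N (N - 1).toNat 1 987654321 le_rfl (by omega)]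
  rw [List.foldl_filter]
  set s := PySem.List.sorted ls (fun x => x) false with hs
  apply List.foldl_ext
  intro a p _
  by_cases hbp : pvBnd s p
  · rcases Decidable.em (p ≤ L) with hl | hl
    · rw [if_pos hbp, if_pos (by simp [hbp, hl])]
      -- inner: guarded scan over the range = min-fold over the filtered window
      rw [← pv_foldl_ite_min (fun q => decide (max (p + 1) (N - L) ≤ q ∧ q ≤ p + L)) (pvV N p)
            ((PySem.List.pyRange 1 N 1).filter (pvBnd s)) a]
      rw [List.foldl_filter]
      apply List.foldl_ext
      intro b q _
      by_cases hbq : pvBnd s q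
      · rw [if_pos hbq, if_pos hbq]
        rcases Decidable.em (p < q) with hpq | hpq
        · rcases Decidable.em (max (p + 1) (N - L) ≤ q ∧ q ≤ p + L) with hw | hw
          · rw [if_pos hpq, if_pos (show pvOk L N p q = true by
              simp only [pvOk, decide_eq_true_eq]; omega), if_pos (by simpa using hw)]
          · rw [if_pos hpq, if_neg (show ¬ pvOk L N p q = true by
              simp only [pvOk, decide_eq_true_eq]; omega), if_neg (by simpa using hw)]
        · rw [if_neg hpq, if_neg (show ¬ (decide (max (p + 1) (N - L) ≤ q ∧ q ≤ p + L) = true) by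
            simp only [decide_eq_true_eq]; omega)]
      · rw [if_neg hbq, if_neg hbq]
    · rw [if_pos hbp, if_neg (by simp [hl])]
      apply pv_foldl_fixed_of
      intro b q _
      rcases Decidable.em (pvBnd s q = true) with hbq | hbq
      · rw [if_pos hbq]
        rcases Decidable.em (p < q) with hpq | hpq
        · rw [if_pos hpq, if_neg (show ¬ pvOk L N p q = true by
            simp only [pvOk, decide_eq_true_eq]; omega)]
        · rw [if_neg hpq]
      · rw [if_neg hbq]
  · rw [if_neg hbp, if_neg (by simp [hbp])]

theorem pv_B_norm2 (N : Int) (ls : List Int) (hN : 2 ≤ N) (L : Int) (hL : L = PySem.Int.floordiv N 2) :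
    check_alt N ls
    = ((PySem.List.pyRange 1 N 1).filter
        (fun p => pvBnd (PySem.List.sorted ls (fun x => x) false) p && decide (p ≤ L))).foldl
        (fun a p => (pvCand (PySem.List.sorted ls (fun x => x) false) N L p).foldl min a)
        987654321 := by
  obtain ⟨m, hm⟩ : ∃ m : Nat, N = (m : Int) + 1 := ⟨(N - 1).toNat, by omega⟩
  unfold check_alt
  simp only
  set s := PySem.List.sorted ls (fun x => x) false with hs
  rw [← hL]
  have hpred : (PySem.List.pyRange 1 N 1).foldl
      (fun acc x => acc ++ [if PySem.List.pyGetD s x 0 ≠ PySem.List.pyGetD s (x - 1) 0 then x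
                            else PySem.List.pyGetD acc (-1) 0]) [(0 : Int)]
      = (List.range (m + 1)).map (pvPredF s) := by
    rw [hm]; exact pv_pred_build s m
  have hsucc := pv_succ_build s N m hm
  rw [hpred, hsucc, List.foldl_filter]
  apply List.foldl_ext
  intro a p hp
  have hp' := PySem.List.mem_pyRange_one.mp hp
  by_cases hc : PySem.List.pyGetD s p 0 ≠ PySem.List.pyGetD s (p - 1) 0 ∧ p ≤ L
  · rw [if_pos hc, if_pos (show (pvBnd s p && decide (p ≤ L)) = true by
      simp only [pvBnd, Bool.and_eq_true, decide_eq_true_eq]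
      exact ⟨Ne.symm hc.1, hc.2⟩)]
    have hLb := pv_div2 N L hL
    have htb := pv_div2 (N + p) (PySem.Int.floordiv (N + p) 2) rfl
    have hg1 : PySem.List.pyGetD ((List.range (m + 1)).map (pvPredF s))
        (min (p + L) (PySem.Int.floordiv (N + p) 2)) 0
        = pvPredF s (min (p + L) (PySem.Int.floordiv (N + p) 2)).toNat :=
      pv_get_map_range _ (m + 1) _ (by omega) (by push_cast; omega)
    have hg2 : PySem.List.pyGetD ((List.range (m + 1)).map (pvSuccF s N))
        (N - max (max (p + 1) (N - L)) (PySem.Int.floordiv (N + p) 2 + 1)) 0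
        = pvSuccF s N (N - max (max (p + 1) (N - L)) (PySem.Int.floordiv (N + p) 2 + 1)).toNat :=
      pv_get_map_range _ (m + 1) _ (by omega) (by push_cast; omega)
    rw [hg1, hg2]
    simp only [pvCand, ge_iff_le]
    split_ifs with h1 h2 h2 <;> simp [List.foldl, pvV]
  · rw [if_neg hc, if_neg (show ¬ (pvBnd s p && decide (p ≤ L)) = true by
      simp only [pvBnd, Bool.and_eq_true, decide_eq_true_eq]
      rintro ⟨hne, hle⟩
      exact hc ⟨Ne.symm hne, hle⟩)]

-- ===== VERDICT (by name: the statement is the Claim_ definition above) =====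
theorem check_spec : Claim_equal_check := by
  intro N ls _ hpre
  unfold Spec_check
  by_cases hN : 2 ≤ N
  · have hL : Int.tdiv N 2 = PySem.Int.floordiv N 2 := by
      unfold PySem.Int.floordiv
      rw [Int.tdiv_eq_ediv_of_nonneg (by omega), Int.fdiv_eq_ediv]
      simp
    rw [pv_A_norm2 N ls hN (PySem.Int.floordiv N 2) hL.symm,
        pv_B_norm2 N ls hN (PySem.Int.floordiv N 2) rfl]
    apply List.foldl_ext
    intro a p hp
    rw [List.mem_filter, Bool.and_eq_true, decide_eq_true_eq] at hp
    obtain ⟨hpr, hpb, hpL⟩ := hp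
    rw [PySem.List.mem_pyRange_one] at hpr
    exact pv_key (PySem.List.sorted ls (fun x => x) false) N (PySem.Int.floordiv N 2) p hN rfl
      (by omega) (by omega) hpb hpL a
  · unfold check check_alt
    simp only
    rw [PySem.List.pyRange_one_eq_nil (by omega : N - 2 ≤ 0),
        PySem.List.pyRange_one_eq_nil (by omega : N ≤ 1)]
    simp
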